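-- pv_equiv track=rewrite | github.com/joybio/multiPrime2-GUI | scripts/multiPrime-core_GUI.py | current_end
-- ===== SOURCE A (Python) =====
-- from itertools import product
--
-- degenerate_base = {"-": ["-"], "A": ["A"], "G": ["G"], "C": ["C"], "T": ["T"], "R": ["A", "G"], "Y": ["C", "T"],
--                    "M": ["A", "C"], "K": ["G", "T"], "S": ["G", "C"], "W": ["A", "T"], "H": ["A", "T", "C"],
--                    "B": ["G", "T", "C"], "V": ["G", "A", "C"], "D": ["G", "A", "T"], "N": ["A", "T", "G", "C"]}
--
-- def degenerate_seq(primer):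
--     seq = []
--     cs = ""
--     for s in primer:
--         if s not in degenerate_base:
--             cs += s
--         else:
--             seq.append([cs + i for i in degenerate_base[s]])
--             cs = ""
--     if cs:
--         seq.append([cs])
--     return ["".join(i) for i in product(*seq)]
--
-- def current_end(primer, adaptor="", num=5, length=14):
--     primer_extend = adaptor + primer
--     end_seq = []
--     for i in range(num, (num + length)):
--         s = primer_extend[-i:]
--         if s:
--             end_seq.extend(degenerate_seq(s))
--     return end_seq
-- ===== SOURCE B (Python) =====
-- # B: instead of re-expanding every suffix with itertools.product, build a table of
-- # suffix expansions once (each length-k suffix's expansions derived from the length-(k-1)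
-- # table entry), then concatenate the table entries the i-loop asks for.
-- degenerate_base = {"-": ["-"], "A": ["A"], "G": ["G"], "C": ["C"], "T": ["T"], "R": ["A", "G"], "Y": ["C", "T"],
--                    "M": ["A", "C"], "K": ["G", "T"], "S": ["G", "C"], "W": ["A", "T"], "H": ["A", "T", "C"],
--                    "B": ["G", "T", "C"], "V": ["G", "A", "C"], "D": ["G", "A", "T"], "N": ["A", "T", "G", "C"]}
--
-- def current_end(primer, adaptor="", num=5, length=14):
--     primer_extend = adaptor + primer
--     n = len(primer_extend)
--     ks = [len(primer_extend[-i:]) for i in range(num, num + length)]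
--     m = max(ks, default=0)
--     exp = [[""]]  # exp[k] = expansions of the length-k suffix of primer_extend
--     for c in reversed(primer_extend[n - m:]):
--         exp.append([o + e for o in degenerate_base.get(c, [c]) for e in exp[-1]])
--     return [e for k in ks if k for e in exp[k]]
-- ===== Notes on version B (the rewrite author's own statement) =====
-- stated objective: faster
-- what changed: Instead of re-running degenerate_seq (prefix-grouping + itertools.product + join) on every suffix primer_extend[-i:], B builds one DP table of suffix expansions (each length-k suffix's expansions derived from the length-(k-1) entry) and the i-loop just concatenates table entries.
import Mathlib
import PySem

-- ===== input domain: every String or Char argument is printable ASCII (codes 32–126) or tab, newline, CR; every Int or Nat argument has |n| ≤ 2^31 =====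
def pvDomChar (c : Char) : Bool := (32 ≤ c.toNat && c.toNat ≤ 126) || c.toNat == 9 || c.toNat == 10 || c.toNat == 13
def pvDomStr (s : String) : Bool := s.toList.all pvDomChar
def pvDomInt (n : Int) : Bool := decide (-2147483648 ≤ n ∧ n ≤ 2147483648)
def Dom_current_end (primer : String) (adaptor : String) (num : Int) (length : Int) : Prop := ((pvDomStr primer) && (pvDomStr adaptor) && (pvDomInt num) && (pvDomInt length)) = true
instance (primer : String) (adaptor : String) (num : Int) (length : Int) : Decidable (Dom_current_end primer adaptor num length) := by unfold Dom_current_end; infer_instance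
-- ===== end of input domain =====

-- B replaces per-suffix re-expansion (product over prefix-grouped lists for every i) with one
-- suffix-DP table: each length-k suffix's expansions are derived from the length-(k-1) entry and the
-- i-loop just indexes the table (objective: faster, measured); A = B on all inputs.


-- Shared module constant: the degenerate_base dict as a lookup on its literal Char keys
-- (strings are carried as List Char; the values are the literal lists of one-char strings).
def degBase (c : Char) : Option (List (List Char)) :=
  match c with
  | '-' => some [['-']]
  | 'A' => some [['A']]
  | 'G' => some [['G']]
  | 'C' => some [['C']]
  | 'T' => some [['T']]
  | 'R' => some [['A'], ['G']]
  | 'Y' => some [['C'], ['T']]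
  | 'M' => some [['A'], ['C']]
  | 'K' => some [['G'], ['T']]
  | 'S' => some [['G'], ['C']]
  | 'W' => some [['A'], ['T']]
  | 'H' => some [['A'], ['T'], ['C']]
  | 'B' => some [['G'], ['T'], ['C']]
  | 'V' => some [['G'], ['A'], ['C']]
  | 'D' => some [['G'], ['A'], ['T']]
  | 'N' => some [['A'], ['T'], ['G'], ['C']]
  | _ => none

-- ===== PORT A =====
-- itertools.product(*seq), tuples as lists; product of no iterables is [()], last position varies fastest
def pyProduct : List (List (List Char)) → List (List (List Char))
  | [] => [[]]
  | g :: rest => g.flatMap (fun x => (pyProduct rest).map (fun t => x :: t))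

-- degenerate_seq: for-loop over the string carrying state (seq, cs); then product + "".join
def degenerate_seq (primer : List Char) : List (List Char) :=
  let st := primer.foldl
    (fun (st : List (List (List Char)) × List Char) s =>
      match degBase s with
      | none => (st.1, st.2 ++ [s])            -- s not in degenerate_base: cs += s
      | some g => (st.1 ++ [g.map (fun i => st.2 ++ i)], []))
    ([], [])
  let seq := if st.2 ≠ [] then st.1 ++ [[st.2]] else st.1   -- if cs: seq.append([cs])
  (pyProduct seq).map (PySem.Chars.join [])

def current_end (primer : String) (adaptor : String) (num : Int) (length : Int) : List String :=
  let primer_extend := adaptor.toList ++ primer.toList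
  ((PySem.List.pyRange num (num + length) 1).foldl
    (fun acc i =>
      let s := PySem.List.slice primer_extend (some (-i)) none
      if s ≠ [] then acc ++ degenerate_seq s else acc)
    []).map String.ofList

-- ===== PORT B =====
-- degenerate_base.get(c, [c])
def degGet (c : Char) : List (List Char) :=
  match degBase c with
  | some g => g
  | none => [[c]]

def current_end_alt (primer : String) (adaptor : String) (num : Int) (length : Int) : List String :=
  let primer_extend := adaptor.toList ++ primer.toList
  let n := PySem.List.len primer_extend
  -- ks = [len(primer_extend[-i:]) for i in range(num, num + length)]
  let ks := (PySem.List.pyRange num (num + length) 1).map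
    (fun i => PySem.List.len (PySem.List.slice primer_extend (some (-i)) none))
  let m := PySem.List.maxD ks (fun k => k) 0          -- max(ks, default=0)
  -- exp = [[""]]; for c in reversed(primer_extend[n-m:]): exp.append([o+e for o in get(c,[c]) for e in exp[-1]])
  let exp := (PySem.List.slice primer_extend (some (n - m)) none).reverse.foldl
    (fun exp c => exp ++
      [(degGet c).flatMap (fun o => (PySem.List.pyGetD exp (-1) []).map (fun e => o ++ e))])
    [[[]]]
  -- [e for k in ks if k for e in exp[k]]
  (ks.flatMap (fun k => if k ≠ 0 then PySem.List.pyGetD exp k [] else [])).map String.ofList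

-- ===== PRECONDITION & SPEC =====
def Spec_current_end (primer : String) (adaptor : String) (num : Int) (length : Int) (out : List String) : Prop := out = current_end_alt primer adaptor num length
instance (primer : String) (adaptor : String) (num : Int) (length : Int) (out : List String) : Decidable (Spec_current_end primer adaptor num length out) := by unfold Spec_current_end; infer_instance

-- ===== CLAIM (what is proved, stated in full; the proofs are below) =====
def Claim_equal_current_end : Prop := ∀ (primer : String) (adaptor : String) (num : Int) (length : Int), Dom_current_end primer adaptor num length → Spec_current_end primer adaptor num length (current_end primer adaptor num length)

-- ===== LEMMAS AND PROOFS =====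

-- proof-side names for A's loop body and finalization
def dsStep (st : List (List (List Char)) × List Char) (s : Char) : List (List (List Char)) × List Char :=
  match degBase s with
  | none => (st.1, st.2 ++ [s])
  | some g => (st.1 ++ [g.map (fun i => st.2 ++ i)], [])

def finalize (st : List (List (List Char)) × List Char) : List (List (List Char)) :=
  if st.2 ≠ [] then st.1 ++ [[st.2]] else st.1

-- per-character left-fold expansion step (intermediate between A's product and B's table)
def expStep (results : List (List Char)) (c : Char) : List (List Char) :=
  results.flatMap (fun r => (degGet c).map (fun o => r ++ o))

-- right-recursion expansion: what each entry of B's suffix table holds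
def rexp : List Char → List (List Char)
  | [] => [[]]
  | c :: t => (degGet c).flatMap (fun o => (rexp t).map (fun e => o ++ e))

-- A's loop in "remaining groups" form (no accumulator)
def dsRest : List Char → List Char → List (List (List Char))
  | [], cs => if cs ≠ [] then [[cs]] else []
  | c :: t, cs =>
    match degBase c with
    | none => dsRest t (cs ++ [c])
    | some g => (g.map (fun i => cs ++ i)) :: dsRest t []

theorem joinNil : PySem.Chars.join ([] : List Char) = List.flatten := by
  funext l
  induction l with
  | nil => simp [PySem.Chars.join_nil]
  | cons a t ih =>
    cases t with
    | nil => simp [PySem.Chars.join_singleton]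
    | cons b u => rw [PySem.Chars.join_cons_cons]; simp_all

theorem dsRest_bridge (l : List Char) (seq : List (List (List Char))) (cs : List Char) :
    finalize (l.foldl dsStep (seq, cs)) = seq ++ dsRest l cs := by
  induction l generalizing seq cs with
  | nil => by_cases h : cs = [] <;> simp [dsRest, finalize, h]
  | cons c t ih =>
    simp only [List.foldl_cons, dsRest, dsStep]
    cases hg : degBase c with
    | none => simpa [hg] using ih seq (cs ++ [c])
    | some g => simpa [hg] using ih (seq ++ [g.map (fun i => cs ++ i)]) []

-- the per-character fold distributes over the result list
theorem expand_distrib (l : List Char) (R : List (List Char)) :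
    l.foldl expStep R = R.flatMap (fun r => l.foldl expStep [r]) := by
  induction l generalizing R with
  | nil => simp
  | cons c t ih =>
    have hr : ∀ r : List Char, List.foldl expStep (expStep [r] c) t
        = ((degGet c).map (fun o => r ++ o)).flatMap (fun x => List.foldl expStep [x] t) := by
      intro r
      rw [show expStep [r] c = (degGet c).map (fun o => r ++ o) from by simp [expStep], ih]
    simp only [List.foldl_cons, hr]
    rw [ih (expStep R c)]
    simp [expStep, List.flatMap_assoc]

-- the fold from a single seed = the fold from [""] with the seed prefixed
theorem expand_prefix (l : List Char) (x : List Char) :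
    l.foldl expStep [x] = (l.foldl expStep [[]]).map (fun z => x ++ z) := by
  induction l generalizing x with
  | nil => simp
  | cons c t ih =>
    simp only [List.foldl_cons]
    rw [show expStep [x] c = (degGet c).map (fun o => x ++ o) from by simp [expStep],
        show expStep [[]] c = degGet c from by simp [expStep],
        expand_distrib t ((degGet c).map (fun o => x ++ o)), expand_distrib t (degGet c)]
    simp only [List.flatMap_map, List.map_flatMap]
    refine List.flatMap_congr (fun o _ => ?_)
    rw [ih (x ++ o), ih o]
    simp [List.map_map, Function.comp_def, List.append_assoc]

-- joined product of A's groups = the per-character fold seeded with [cs]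
theorem dsRest_expand (l : List Char) (cs : List Char) :
    (pyProduct (dsRest l cs)).map List.flatten = l.foldl expStep [cs] := by
  induction l generalizing cs with
  | nil => by_cases h : cs = [] <;> simp [dsRest, pyProduct, h]
  | cons c t ih =>
    simp only [dsRest, List.foldl_cons]
    cases hg : degBase c with
    | none =>
      rw [show expStep [cs] c = [cs ++ [c]] from by simp [expStep, degGet, hg]]
      exact ih (cs ++ [c])
    | some g =>
      simp only [pyProduct, List.map_flatMap, List.map_map]
      rw [show expStep [cs] c = g.map (fun i => cs ++ i) from by simp [expStep, degGet, hg],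
          expand_distrib t (g.map (fun i => cs ++ i))]
      simp only [List.flatMap_map]
      have hpt : ∀ i : List Char, List.foldl expStep [cs ++ i] t
          = ((pyProduct (dsRest t [])).map List.flatten).map (fun z => (cs ++ i) ++ z) := by
        intro i; rw [expand_prefix, ih []]
      simp only [hpt]
      simp [List.map_map, Function.comp_def, List.append_assoc]

-- the right-recursion equals the per-character fold
theorem rexp_eq_foldl (l : List Char) : rexp l = l.foldl expStep [[]] := by
  induction l with
  | nil => simp [rexp]
  | cons c t ih =>
    simp only [rexp, List.foldl_cons]
    rw [show expStep [[]] c = degGet c from by simp [expStep], expand_distrib t (degGet c)]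
    refine List.flatMap_congr (fun o _ => ?_)
    rw [expand_prefix t o, ih]

theorem degenerate_seq_eq_rexp (s : List Char) : degenerate_seq s = rexp s := by
  have e1 : degenerate_seq s = (pyProduct (finalize (s.foldl dsStep ([], [])))).map (PySem.Chars.join []) := rfl
  rw [e1, joinNil, dsRest_bridge s [] [], List.nil_append, dsRest_expand, rexp_eq_foldl]

-- B's table after the backward pass: entry j holds rexp of the length-j suffix of t
theorem table_spec (t : List Char) :
    t.reverse.foldl
      (fun exp c => exp ++
        [(degGet c).flatMap (fun o => (PySem.List.pyGetD exp (-1) []).map (fun e => o ++ e))])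
      [[[]]]
    = (List.range (t.length + 1)).map (fun j => rexp (t.drop (t.length - j))) := by
  induction t with
  | nil => simp [rexp]
  | cons c u ih =>
    rw [List.reverse_cons, List.foldl_append, ih]
    rw [show List.range (u.length + 1) = List.range u.length ++ [u.length] from List.range_succ,
        List.map_append, List.foldl_cons, List.foldl_nil, List.map_singleton,
        Nat.sub_self, List.drop_zero, PySem.List.pyGetD_neg_one_append_singleton]
    rw [show List.range (c :: u).length.succ = List.range (u.length + 1) ++ [u.length + 1] from by
          simp [List.range_succ],
        List.map_append, List.range_succ, List.map_append]
    simp only [List.length_cons, List.map_singleton, Nat.sub_self, List.drop_zero,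
      List.append_assoc]
    congr 1
    · refine List.map_congr_left (fun j hj => ?_)
      have hj' : j < u.length := List.mem_range.mp hj
      have : u.length + 1 - j = (u.length - j) + 1 := by omega
      rw [this, List.drop_succ_cons]
    · have h3 : u.length + 1 - u.length = 1 := by omega
      simp [h3, rexp]

-- outer loops: A's per-suffix re-expansion = B's table lookups
theorem outer_eq (pe : List Char) (r : List Int) :
    r.foldl
      (fun acc i =>
        let s := PySem.List.slice pe (some (-i)) none
        if s ≠ [] then acc ++ degenerate_seq s else acc) []
    = (r.map (fun i => PySem.List.len (PySem.List.slice pe (some (-i)) none))).flatMap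
        (fun k => if k ≠ 0 then
            PySem.List.pyGetD
              ((PySem.List.slice pe
                  (some (PySem.List.len pe -
                    PySem.List.maxD (r.map (fun i => PySem.List.len (PySem.List.slice pe (some (-i)) none))) (fun k => k) 0))
                  none).reverse.foldl
                (fun exp c => exp ++
                  [(degGet c).flatMap (fun o => (PySem.List.pyGetD exp (-1) []).map (fun e => o ++ e))])
                [[[]]]) k []
          else []) := by
  set ks := r.map (fun i => PySem.List.len (PySem.List.slice pe (some (-i)) none)) with hks
  set m := PySem.List.maxD ks (fun k => k) 0 with hm
  -- A's loop as a flatMap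
  have hshape :
      (fun (acc : List (List Char)) (i : Int) =>
        let s := PySem.List.slice pe (some (-i)) none
        if s ≠ [] then acc ++ degenerate_seq s else acc)
      = (fun acc i => acc ++
          (if PySem.List.slice pe (some (-i)) none ≠ [] then
            degenerate_seq (PySem.List.slice pe (some (-i)) none) else [])) := by
    funext acc i
    by_cases h : PySem.List.slice pe (some (-i)) none = [] <;> simp [h]
  rw [hshape, PySem.List.foldl_append_eq_flatMap, List.nil_append, hks, List.flatMap_map]
  refine List.flatMap_congr (fun i hi => ?_)
  by_cases hs : PySem.List.slice pe (some (-i)) none = []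
  · simp [hs, PySem.List.len_eq]
  · -- the suffix is nonempty; identify it with a table entry
    rw [PySem.List.slice_some_none] at hs ⊢
    have hclamp_le := PySem.List.clampIdx_le pe.length (-i)
    set c0 := PySem.List.clampIdx pe.length (-i) with hc0
    have hk_mem : PySem.List.len (List.drop c0 pe) ∈ ks := by
      rw [hks]
      exact List.mem_map.mpr ⟨i, hi, by rw [PySem.List.slice_some_none, ← hc0]⟩
    have hkm : PySem.List.len (List.drop c0 pe) ≤ m := PySem.List.le_maxD_id ks 0 _ hk_mem
    rw [PySem.List.len_eq, List.length_drop] at hkm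
    have hm0 : 0 ≤ m := le_trans (Int.natCast_nonneg _) hkm
    -- every element of ks is a suffix length, so m ≤ len pe
    have hm_le : m ≤ (pe.length : Int) := by
      rcases PySem.List.maxD_mem ks (fun k => k) 0 (List.ne_nil_of_mem hk_mem) with hmem
      rw [← hm] at hmem
      rcases List.mem_map.mp (hks ▸ hmem) with ⟨i', _, hi'⟩
      rw [← hi', PySem.List.len_eq, PySem.List.slice_some_none, List.length_drop]
      exact_mod_cast Nat.sub_le _ _
    have hmn : m.toNat ≤ pe.length := by omega
    have hkmN : pe.length - c0 ≤ m.toNat := by omega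
    -- the table's underlying suffix
    have htail : PySem.List.slice pe (some (PySem.List.len pe - m)) none
        = pe.drop (pe.length - m.toNat) := by
      rw [PySem.List.len_eq, PySem.List.slice_from pe (by omega : (0:Int) ≤ (pe.length : Int) - m)]
      congr 1; omega
    have htail_len : (pe.drop (pe.length - m.toNat)).length = m.toNat := by
      rw [List.length_drop]; omega
    have hlz : 0 < pe.length - c0 := by
      rcases Nat.eq_zero_or_pos (pe.length - c0) with h0 | h
      · exact absurd (List.length_eq_zero_iff.mp (by rw [List.length_drop]; exact h0)) hs
      · exact h
    rw [htail, table_spec, PySem.List.len_eq, List.length_drop,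
        if_pos hs, if_pos (show ((pe.length - c0 : Nat) : Int) ≠ 0 from by exact_mod_cast Nat.pos_iff_ne_zero.mp hlz)]
    rw [PySem.List.pyGetD_natCast, htail_len,
        PySem.List.getD_map_range _ _ _ _ (by omega), List.drop_drop]
    rw [show pe.length - m.toNat + (m.toNat - (pe.length - c0)) = c0 from by omega]
    rw [degenerate_seq_eq_rexp]

-- ===== VERDICT (by name: the statement is the Claim_ definition above) =====
theorem current_end_spec : Claim_equal_current_end := by
  intro primer adaptor num length _
  unfold Spec_current_end current_end current_end_alt
  simp only []
  rw [outer_eq (adaptor.toList ++ primer.toList) (PySem.List.pyRange num (num + length) 1)]
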